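-- pv_equiv track=rewrite | github.com/ngeodesic-ai/ngf-alpha | dev/small-benchmarks-depr-v1/stage11-well-benchmark-v10e.py | _expected_shape_sequence
-- ===== SOURCE A (Python) =====
-- def _expected_shape_sequence(rows:int, cols:int):
--     # Serialized target pattern over the alphabet { '[', ']', ',', 'd' }
--     seq = ['[', '[']  # we always start "[["
--     for i in range(rows):
--         seq.append('[')
--         for j in range(cols):
--             seq.append('d')
--             if j < cols-1:
--                 seq.append(',')
--         seq.append(']')
--         if i < rows-1:
--             seq += [',','[']
--     seq.append(']')
--     return seq  # e.g., [[ [ d , d ] , [ d , d ] ]]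
-- ===== SOURCE B (Python) =====
-- def _expected_shape_sequence(rows:int, cols:int):
--     # Assemble the serialized pattern with string joins, then split into chars.
--     if rows <= 0:
--         return ['[', '[', ']']
--     cell = '[' + ','.join(['d'] * cols) + ']'
--     return list('[[' + ',['.join([cell] * rows) + ']')
-- ===== Notes on version B (the rewrite author's own statement) =====
-- stated objective: simpler
-- what changed: Replaced the nested append loops with j<cols-1 / i<rows-1 conditionals by building one cell string with ','.join, joining the rows with ',[', and splitting the assembled string into characters.
import Mathlib
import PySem

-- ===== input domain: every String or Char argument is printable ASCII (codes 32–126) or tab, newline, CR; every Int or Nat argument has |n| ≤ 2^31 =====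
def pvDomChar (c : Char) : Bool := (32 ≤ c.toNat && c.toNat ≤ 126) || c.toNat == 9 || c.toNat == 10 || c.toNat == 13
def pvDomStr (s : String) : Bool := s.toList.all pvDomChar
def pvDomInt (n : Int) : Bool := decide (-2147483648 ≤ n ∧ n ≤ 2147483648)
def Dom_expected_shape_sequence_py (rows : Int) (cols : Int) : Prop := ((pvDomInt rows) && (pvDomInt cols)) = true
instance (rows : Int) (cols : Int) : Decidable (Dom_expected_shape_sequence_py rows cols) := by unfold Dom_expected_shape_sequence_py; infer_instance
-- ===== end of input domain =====

-- B builds the pattern with string joins instead of nested append loops (objective: simpler).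

-- ===== PORT A =====
def expected_shape_sequence_py (rows : Int) (cols : Int) : List String :=
  let seq : List String := ["[", "["]
  let seq := (PySem.List.pyRange 0 rows 1).foldl (fun seq i =>
    let seq := seq ++ ["["]
    let seq := (PySem.List.pyRange 0 cols 1).foldl (fun seq j =>
      let seq := seq ++ ["d"]
      if j < cols - 1 then seq ++ [","] else seq) seq
    let seq := seq ++ ["]"]
    if i < rows - 1 then seq ++ [",", "["] else seq) seq
  seq ++ ["]"]

-- ===== PORT B =====
def expected_shape_sequence_py_alt (rows : Int) (cols : Int) : List String :=
  if rows ≤ 0 then ["[", "[", "]"] else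
  let cell : String := "[" ++ PySem.Str.join "," (PySem.List.pyRepeat ["d"] cols) ++ "]"
  let whole : String := "[[" ++ PySem.Str.join ",[" (PySem.List.pyRepeat [cell] rows) ++ "]"
  whole.toList.map (fun c => String.ofList [c])

-- ===== PRECONDITION & SPEC =====
def Spec_expected_shape_sequence_py (rows : Int) (cols : Int) (out : List String) : Prop := out = expected_shape_sequence_py_alt rows cols
instance (rows : Int) (cols : Int) (out : List String) : Decidable (Spec_expected_shape_sequence_py rows cols out) := by unfold Spec_expected_shape_sequence_py; infer_instance

-- ===== CLAIM (what is proved, stated in full; the proofs are below) =====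
def Claim_equal_expected_shape_sequence_py : Prop := ∀ (rows : Int) (cols : Int), Dom_expected_shape_sequence_py rows cols → Spec_expected_shape_sequence_py rows cols (expected_shape_sequence_py rows cols)

-- ===== LEMMAS AND PROOFS =====

-- Chars.join is List.intercalate.
theorem chars_join_eq_intercalate (sep : List Char) (parts : List (List Char)) :
    PySem.Chars.join sep parts = List.intercalate sep parts := by
  induction parts with
  | nil => simp [PySem.Chars.join_nil, List.intercalate]
  | cons p ps ih =>
    cases ps with
    | nil => simp [PySem.Chars.join_singleton, List.intercalate]
    | cons q qs =>
      rw [PySem.Chars.join_cons_cons, ih]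
      simp [List.intercalate, List.intersperse]

-- map distributes over intercalate.
theorem map_intercalate {α β : Type} (f : α → β) (sep : List α) (l : List (List α)) :
    (List.intercalate sep l).map f = List.intercalate (sep.map f) (l.map (List.map f)) := by
  induction l with
  | nil => simp [List.intercalate]
  | cons a l ih =>
    cases l with
    | nil => simp [List.intercalate]
    | cons b l =>
      simp only [List.intercalate, List.intersperse, List.flatten, List.map]
        at ih ⊢
      simp [ih]

-- flatten of replicated (blk ++ sep) followed by a final blk is an intercalation.
theorem flatten_replicate_append {α : Type} (blk sep : List α) (n : Nat) :
    (List.replicate n (blk ++ sep)).flatten ++ blk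
      = List.intercalate sep (List.replicate (n + 1) blk) := by
  induction n with
  | zero => simp [List.intercalate]
  | succ n ih =>
    rw [List.replicate_succ, List.flatten_cons, List.append_assoc, ih]
    rw [List.replicate_succ (n := n + 1)]
    cases n with
    | zero => simp [List.intercalate, List.intersperse]
    | succ m =>
      rw [List.replicate_succ (n := m + 1)]
      simp [List.intercalate, List.intersperse]

-- The 'append a block, then a separator unless last' loop over range(m) is an intercalation.
theorem pyflat {α : Type} (blk sep : List α) (m : Int) :
    (PySem.List.pyRange 0 m 1).flatMap (fun i => blk ++ if i < m - 1 then sep else [])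
      = List.intercalate sep (List.replicate m.toNat blk) := by
  by_cases h : m ≤ 0
  · rw [PySem.List.pyRange_one_eq_nil h]
    have : m.toNat = 0 := Int.toNat_of_nonpos h
    simp [this, List.intercalate]
  · replace h : 0 < m := by omega
    obtain ⟨n, rfl⟩ : ∃ n : Nat, m = (n : Int) + 1 := by
      refine ⟨(m - 1).toNat, ?_⟩
      omega
    have hsplit : PySem.List.pyRange 0 ((n : Int) + 1) 1
        = PySem.List.pyRange 0 (n : Int) 1 ++ [(n : Int)] := by
      exact PySem.List.pyRange_one_succ_right (by exact_mod_cast Int.natCast_nonneg n)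
    rw [hsplit, List.flatMap_append]
    have hbody : (PySem.List.pyRange 0 (n : Int) 1).flatMap
          (fun i => blk ++ if i < (n : Int) + 1 - 1 then sep else [])
        = (PySem.List.pyRange 0 (n : Int) 1).flatMap (fun _ => blk ++ sep) := by
      apply List.flatMap_congr
      intro i hi
      have hmem := (PySem.List.mem_pyRange_one).1 hi
      have hlt : i < (n : Int) + 1 - 1 := by omega
      rw [if_pos hlt]
    rw [hbody]
    have hconst : (PySem.List.pyRange 0 (n : Int) 1).flatMap (fun _ => blk ++ sep)
        = (List.replicate n (blk ++ sep)).flatten := by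
      rw [List.flatMap_def, List.map_const', PySem.List.length_pyRange_one]
      simp
    rw [hconst, List.flatMap_singleton]
    have : ¬ ((n : Int) < (n : Int) + 1 - 1) := by omega
    simp only [this, if_false, List.append_nil]
    rw [flatten_replicate_append]
    norm_num

-- A's inner loop body rewritten to the ++-of-if shape.
theorem inner_loop_eq (cols : Int) (init : List String) :
    (PySem.List.pyRange 0 cols 1).foldl (fun seq j =>
        if j < cols - 1 then seq ++ ["d"] ++ [","] else seq ++ ["d"]) init
      = init ++ List.intercalate [","] (List.replicate cols.toNat ["d"]) := by
  have h : (PySem.List.pyRange 0 cols 1).foldl (fun seq j =>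
        if j < cols - 1 then seq ++ ["d"] ++ [","] else seq ++ ["d"]) init
      = (PySem.List.pyRange 0 cols 1).foldl (fun seq j =>
        seq ++ (["d"] ++ if j < cols - 1 then [","] else [])) init := by
    apply PySem.List.foldl_congr_mem
    intro acc x _
    by_cases hx : x < cols - 1 <;> simp [hx]
  rw [h, PySem.List.foldl_append_eq_flatMap, pyflat]

-- A in closed form.
theorem portA_closed (rows cols : Int) :
    expected_shape_sequence_py rows cols
      = ["[", "["]
        ++ List.intercalate [",", "["]
            (List.replicate rows.toNat
              (["["] ++ List.intercalate [","] (List.replicate cols.toNat ["d"]) ++ ["]"]))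
        ++ ["]"] := by
  unfold expected_shape_sequence_py
  simp only []
  have h : (PySem.List.pyRange 0 rows 1).foldl (fun seq i =>
        let seq := seq ++ ["["]
        let seq := (PySem.List.pyRange 0 cols 1).foldl (fun seq j =>
          let seq := seq ++ ["d"]
          if j < cols - 1 then seq ++ [","] else seq) seq
        let seq := seq ++ ["]"]
        if i < rows - 1 then seq ++ [",", "["] else seq) (["[", "["] : List String)
      = (PySem.List.pyRange 0 rows 1).foldl (fun seq i =>
        seq ++ ((["["] ++ List.intercalate [","] (List.replicate cols.toNat ["d"]) ++ ["]"])
          ++ if i < rows - 1 then [",", "["] else [])) (["[", "["] : List String) := by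
    apply PySem.List.foldl_congr_mem
    intro acc x _
    simp only [inner_loop_eq]
    by_cases hx : x < rows - 1 <;> simp [hx]
  rw [h, PySem.List.foldl_append_eq_flatMap, pyflat]

-- B in the same closed form.
theorem portB_closed (rows cols : Int) :
    expected_shape_sequence_py_alt rows cols
      = ["[", "["]
        ++ List.intercalate [",", "["]
            (List.replicate rows.toNat
              (["["] ++ List.intercalate [","] (List.replicate cols.toNat ["d"]) ++ ["]"]))
        ++ ["]"] := by
  unfold expected_shape_sequence_py_alt
  by_cases hr : rows ≤ 0
  · have h0 : rows.toNat = 0 := Int.toNat_of_nonpos hr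
    simp [hr, h0, List.intercalate]
  simp only [if_neg hr]
  simp only [String.toList_append, PySem.Str.toList_join, PySem.List.pyRepeat_singleton,
    List.map_replicate, chars_join_eq_intercalate, List.map_append, map_intercalate]
  rfl

-- ===== VERDICT (by name: the statement is the Claim_ definition above) =====
theorem expected_shape_sequence_py_spec : Claim_equal_expected_shape_sequence_py := by
  intro rows cols _
  unfold Spec_expected_shape_sequence_py
  rw [portA_closed, portB_closed]
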